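-- pv_equiv track=rewrite | github.com/importhuman/bcci-tv | src/bcci_tv/api/utils.py | filter_tournament_standings
-- ===== SOURCE A (Python) =====
-- from typing import Any, Dict, List, Optional
--
-- def filter_tournament_standings(data: Dict[str, Any]) -> Dict[str, List[Dict[str, Any]]]:
--     """
--     Filters and groups tournament standings by category.
--
--     1. Returns empty dict if 'category' array is empty or missing.
--     2. Groups teams from 'points' by their 'Category'.
--     3. Sorts teams within each category by 'OrderNo' ascending.
--     """
--     categories = data.get("category", [])
--     if not categories:
--         return {}
--
--     # Extract the string values from category objects (e.g. "Group A")
--     # and initialize the result dictionary with those strings as keys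
--     category_names = [cat.get("Category") for cat in categories if cat.get("Category")]
--     grouped_standings = {name: [] for name in category_names}
--
--     points = data.get("points", [])
--     for team in points:
--         team_cat = team.get("Category")
--         if team_cat in grouped_standings:
--             grouped_standings[team_cat].append(team)
--
--     # Sort each group by OrderNo (ascending)
--     for cat in grouped_standings:
--         grouped_standings[cat].sort(key=lambda x: int(x.get("OrderNo", 0)))
--
--     return grouped_standings
-- ===== SOURCE B (Python) =====
-- def filter_tournament_standings(data):
--     """Sort the valid teams ONCE globally by OrderNo (stable), then build each
--     category's group directly by filtering that sorted list in a dict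
--     comprehension -- no incremental appends, no per-group sorts."""
--     categories = data.get("category", [])
--     if not categories:
--         return {}
--     names = [c.get("Category") for c in categories if c.get("Category")]
--     known = set(names)
--     ordered = sorted([t for t in data.get("points", []) if t.get("Category") in known],
--                      key=lambda x: int(x.get("OrderNo", 0)))
--     return {name: [t for t in ordered if t.get("Category") == name] for name in names}
-- ===== Notes on version B (the rewrite author's own statement) =====
-- stated objective: alternative
-- what changed: A builds a dict of empty lists, appends each team in a loop, then sorts every group separately; B sorts the valid teams once globally (stable) and builds the result in one dict comprehension whose value for each category is a filter of that sorted list -- no mutation, no per-group sorts.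
import Mathlib
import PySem

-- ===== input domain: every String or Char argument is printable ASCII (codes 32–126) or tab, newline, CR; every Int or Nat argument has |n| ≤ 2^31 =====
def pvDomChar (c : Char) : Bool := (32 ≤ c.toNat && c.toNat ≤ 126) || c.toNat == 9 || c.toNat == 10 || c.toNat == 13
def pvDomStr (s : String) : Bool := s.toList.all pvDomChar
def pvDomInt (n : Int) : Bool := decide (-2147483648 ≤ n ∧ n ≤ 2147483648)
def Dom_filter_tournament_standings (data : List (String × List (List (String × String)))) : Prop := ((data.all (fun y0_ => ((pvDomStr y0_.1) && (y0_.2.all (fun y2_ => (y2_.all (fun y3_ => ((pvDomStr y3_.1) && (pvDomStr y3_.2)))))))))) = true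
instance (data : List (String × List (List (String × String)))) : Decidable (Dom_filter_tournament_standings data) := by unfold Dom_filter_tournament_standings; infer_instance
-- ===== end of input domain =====

-- B replaces A's "append per team, then sort each group" by ONE global stable sort of the valid
-- teams followed by a dict comprehension that filters that sorted list per category
-- (objective: alternative decomposition, same asymptotic cost).

-- ===== PORT A =====
-- dict lookup (first match, per the association-list convention)
def pvLookup (d : List (String × String)) (k : String) : Option String :=
  (d.find? (fun p => p.1 == k)).map (·.2)

def pvLookupTop (d : List (String × List (List (String × String)))) (k : String) :
    Option (List (List (String × String))) :=
  (d.find? (fun p => p.1 == k)).map (·.2)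

-- int(t.get("OrderNo", 0)); the .getD 0 is unreachable under Pre_ (Python raises ValueError there)
def pvKey (t : List (String × String)) : Int :=
  match pvLookup t "OrderNo" with
  | none => 0
  | some s => (PySem.Int.ofStr? s).getD 0

-- A's list comprehension: [cat.get("Category") for cat in categories if cat.get("Category")]
def pvCategoryNames (categories : List (List (String × String))) : List String :=
  categories.filterMap (fun cat =>
    match pvLookup cat "Category" with
    | some s => if s = "" then none else some s
    | none => none)

-- A's points loop body: append team to its group only when the Category is a known key
def pvStepA (g : PySem.Dict String (List (List (String × String)))) (t : List (String × String)) :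
    PySem.Dict String (List (List (String × String))) :=
  match pvLookup t "Category" with
  | some c => if g.contains c then g.modify c [] (fun l => l ++ [t]) else g
  | none => g

def filter_tournament_standings (data : List (String × List (List (String × String)))) : List (String × List (List (String × String))) :=
  let categories := (pvLookupTop data "category").getD []
  if categories = [] then []
  else
    let category_names := pvCategoryNames categories
    let grouped : PySem.Dict String (List (List (String × String))) :=
      category_names.foldl (fun d name => d.insert name []) PySem.Dict.empty
    let points := (pvLookupTop data "points").getD []
    let grouped2 := points.foldl pvStepA grouped
    -- final loop: sort each group in place by OrderNo
    grouped2.items.map (fun p => (p.1, PySem.List.sorted p.2 pvKey false))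

-- ===== PORT B =====
-- Source B: one global stable sort of the valid teams, then a dict comprehension
-- {name: [t for t in ordered if t.get("Category") == name] for name in names}.
-- Python's dicts are ported via PySem.Dict.mk/get? here.
def filter_tournament_standings_alt (data : List (String × List (List (String × String)))) : List (String × List (List (String × String))) :=
  match (PySem.Dict.mk data).get? "category" with
  | none => []
  | some cats =>
    if cats = [] then []
    else
      let names := cats.filterMap (fun cat =>
        match (PySem.Dict.mk cat).get? "Category" with
        | some s => if s = "" then none else some s
        | none => none)
      let known : PySem.Set String := PySem.Set.ofList names
      let ordered := PySem.List.sorted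
        ((((PySem.Dict.mk data).get? "points").getD []).filter (fun t =>
          match (PySem.Dict.mk t).get? "Category" with
          | some c => known.contains c
          | none => false))
        (fun x => match (PySem.Dict.mk x).get? "OrderNo" with
          | none => (0 : Int)
          | some s => (PySem.Int.ofStr? s).getD 0) false
      (names.foldl (fun d name =>
        d.insert name (ordered.filter (fun t => (PySem.Dict.mk t).get? "Category" == some name)))
        PySem.Dict.empty).items

-- ===== PRECONDITION & SPEC =====
-- Pre_ excludes exactly the inputs where Python A raises ValueError: a team whose Category is one of the
-- valid category names but whose OrderNo string does not parse as an int (A applies int() to those teams' keys).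
def Pre_filter_tournament_standings (data : List (String × List (List (String × String)))) : Prop :=
  (((pvLookupTop data "points").getD []).all (fun t =>
    match pvLookup t "Category" with
    | some c =>
        !((pvCategoryNames ((pvLookupTop data "category").getD [])).contains c) ||
        (match pvLookup t "OrderNo" with
         | none => true
         | some s => (PySem.Int.ofStr? s).isSome)
    | none => true)) = true
instance (data : List (String × List (List (String × String)))) : Decidable (Pre_filter_tournament_standings data) := by unfold Pre_filter_tournament_standings; infer_instance

def pvWitness_filter_tournament_standings : (List (String × List (List (String × String)))) :=
  [("category", [[("Category", "A")], [("Category", "B")]]),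
   ("points", [[("Category", "A"), ("OrderNo", "2")],
               [("Category", "B"), ("OrderNo", "1")],
               [("Category", "A"), ("OrderNo", "1")]])]

def Spec_filter_tournament_standings (data : List (String × List (List (String × String)))) (out : List (String × List (List (String × String)))) : Prop := out = filter_tournament_standings_alt data
instance (data : List (String × List (List (String × String)))) (out : List (String × List (List (String × String)))) : Decidable (Spec_filter_tournament_standings data out) := by unfold Spec_filter_tournament_standings; infer_instance

-- ===== CLAIM (what is proved, stated in full; the proofs are below) =====
def Claim_equal_filter_tournament_standings : Prop := ∀ (data : List (String × List (List (String × String)))), Dom_filter_tournament_standings data → Pre_filter_tournament_standings data → Spec_filter_tournament_standings data (filter_tournament_standings data)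

-- ===== LEMMAS AND PROOFS =====

-- Dict.mk lookup is the first-match association-list lookup
theorem pv_get?_mk {ν : Type} (l : List (String × ν)) (k : String) :
    (PySem.Dict.mk l).get? k = (l.find? (fun p => p.1 == k)).map (·.2) := by
  induction l with
  | nil => rfl
  | cons p l ih =>
    rw [PySem.Dict.get?_mk_cons, List.find?_cons]
    by_cases h : (p.1 == k) = true
    · simp [h]
    · simp only [h, Bool.false_eq_true, if_neg, not_false_iff, ih]

theorem pv_mk_top (d : List (String × List (List (String × String)))) (k : String) :
    (PySem.Dict.mk d).get? k = pvLookupTop d k := pv_get?_mk d k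

theorem pv_mk_inner (t : List (String × String)) (k : String) :
    (PySem.Dict.mk t).get? k = pvLookup t k := pv_get?_mk t k

theorem pv_pairwise_insertBy {α κ : Type} [LinearOrder κ] (key : α → κ) (x : α) (ys : List α)
    (h : ys.Pairwise (fun a b => key a ≤ key b)) :
    (PySem.List.insertBy (fun a b => decide (key a < key b)) x ys).Pairwise (fun a b => key a ≤ key b) := by
  induction ys with
  | nil => simp [PySem.List.insertBy]
  | cons y ys ih =>
    rcases List.pairwise_cons.mp h with ⟨hy, htail⟩
    by_cases hlt : key x < key y
    · simp only [PySem.List.insertBy, hlt, decide_true, if_pos]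
      refine List.pairwise_cons.mpr ⟨?_, h⟩
      intro b hb
      rcases List.mem_cons.mp hb with rfl | hb
      · exact le_of_lt hlt
      · exact le_trans (le_of_lt hlt) (hy b hb)
    · simp only [PySem.List.insertBy, hlt, decide_false, if_neg, Bool.false_eq_true,
        not_false_iff]
      refine List.pairwise_cons.mpr ⟨?_, ih htail⟩
      intro b hb
      rcases (PySem.List.mem_insertBy _ x b ys).mp hb with rfl | hb
      · exact le_of_not_gt hlt
      · exact hy b hb

theorem pv_filter_insertBy {α κ : Type} [LinearOrder κ] (key : α → κ) (p : α → Bool) (x : α) (ys : List α)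
    (h : ys.Pairwise (fun a b => key a ≤ key b)) :
    (PySem.List.insertBy (fun a b => decide (key a < key b)) x ys).filter p =
      if p x then PySem.List.insertBy (fun a b => decide (key a < key b)) x (ys.filter p)
      else ys.filter p := by
  induction ys with
  | nil => by_cases hp : p x <;> simp [PySem.List.insertBy, hp]
  | cons y ys ih =>
    rcases List.pairwise_cons.mp h with ⟨hy, htail⟩
    by_cases hlt : key x < key y
    · simp only [PySem.List.insertBy, hlt, decide_true, if_pos]
      by_cases hp : p x
      · by_cases hpy : p y
        · simp [hp, hpy, PySem.List.insertBy, hlt]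
        · simp only [List.filter_cons, hp, hpy, if_pos, if_neg, Bool.false_eq_true, not_false_iff]
          cases hfe : ys.filter p with
          | nil => simp [PySem.List.insertBy]
          | cons z zs =>
            have hz : z ∈ ys.filter p := by rw [hfe]; exact List.mem_cons_self
            have hzy : key y ≤ key z := hy z (List.mem_of_mem_filter hz)
            have : key x < key z := lt_of_lt_of_le hlt hzy
            simp [PySem.List.insertBy, this]
      · simp [List.filter_cons, hp]
    · simp only [PySem.List.insertBy, hlt, decide_false, if_neg, Bool.false_eq_true, not_false_iff]
      by_cases hp : p x
      · by_cases hpy : p y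
        · simp only [List.filter_cons, hpy, if_pos, ih htail, hp, if_pos]
          simp [PySem.List.insertBy, hlt]
        · simp only [List.filter_cons, hpy, Bool.false_eq_true, if_neg, not_false_iff, ih htail, hp, if_pos]
      · simp only [List.filter_cons, ih htail, hp, Bool.false_eq_true, if_neg, not_false_iff]

theorem pv_filter_sorted_aux {α κ : Type} [LinearOrder κ] (key : α → κ) (p : α → Bool) (xs acc : List α)
    (h : acc.Pairwise (fun a b => key a ≤ key b)) :
    (xs.foldl (fun acc x => PySem.List.insertBy (fun a b => decide (key a < key b)) x acc) acc).filter p =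
      (xs.filter p).foldl (fun acc x => PySem.List.insertBy (fun a b => decide (key a < key b)) x acc) (acc.filter p) := by
  induction xs generalizing acc with
  | nil => simp
  | cons x xs ih =>
    simp only [List.foldl_cons, List.filter_cons]
    by_cases hp : p x
    · rw [ih _ (pv_pairwise_insertBy key x acc h)]
      rw [pv_filter_insertBy key p x acc h]
      simp [hp]
    · rw [ih _ (pv_pairwise_insertBy key x acc h)]
      rw [pv_filter_insertBy key p x acc h]
      simp [hp]

theorem pv_filter_sorted {α κ : Type} [LinearOrder κ] (key : α → κ) (p : α → Bool) (xs : List α) :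
    (PySem.List.sorted xs key false).filter p = PySem.List.sorted (xs.filter p) key false := by
  rw [PySem.List.sorted_eq_foldl_insertBy, PySem.List.sorted_eq_foldl_insertBy]
  simpa using pv_filter_sorted_aux key p xs [] (List.Pairwise.nil)

theorem pv_keysA (pts : List (List (String × String))) (d : PySem.Dict String (List (List (String × String)))) :
    (pts.foldl pvStepA d).keys = d.keys := by
  induction pts generalizing d with
  | nil => rfl
  | cons t pts ih =>
    rw [List.foldl_cons, ih]
    unfold pvStepA
    cases hc : pvLookup t "Category" with
    | none => rfl
    | some c =>
      by_cases hin : (d.contains c) = true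
      · simp only [hin, if_pos, PySem.Dict.keys_modify,
          PySem.Dict.keys_insert_of_contains d _ hin]
      · simp [hin]

theorem pv_getDA (pts : List (List (String × String))) (d : PySem.Dict String (List (List (String × String))))
    (c : String) (hc : d.contains c = true) :
    (pts.foldl pvStepA d).getD c [] =
      d.getD c [] ++ pts.filter (fun t => pvLookup t "Category" == some c) := by
  induction pts generalizing d with
  | nil => simp
  | cons t pts ih =>
    rw [List.foldl_cons, List.filter_cons]
    by_cases hct : pvLookup t "Category" = some c
    · have hstep : pvStepA d t = d.modify c [] (fun l => l ++ [t]) := by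
        unfold pvStepA; rw [hct]; simp [hc]
      rw [hstep, ih _ (by rw [PySem.Dict.contains_modify]; simp [hc])]
      rw [PySem.Dict.getD_modify_self]
      simp [hct]
    · have hgd : (pvStepA d t).getD c [] = d.getD c [] ∧ (pvStepA d t).contains c = true := by
        unfold pvStepA
        cases h' : pvLookup t "Category" with
        | none => exact ⟨rfl, hc⟩
        | some c' =>
          have hne : c ≠ c' := by rintro rfl; exact hct h'
          by_cases hin : (d.contains c') = true
          · simp only [hin, if_pos]
            exact ⟨PySem.Dict.getD_modify_of_ne d _ _ hne, by rw [PySem.Dict.contains_modify]; simp [hc]⟩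
          · simp only [hin]
            exact ⟨rfl, hc⟩
      rw [ih _ hgd.2, hgd.1]
      have : (pvLookup t "Category" == some c) = false := by simp [hct]
      simp [this]

-- the dict comprehension: value at k is f k when k was one of the keys (f depends on the key only)
theorem pv_getD_comp (f : String → List (List (String × String))) (ns : List String)
    (d : PySem.Dict String (List (List (String × String)))) (k : String) :
    (ns.foldl (fun d n => d.insert n (f n)) d).getD k [] =
      if k ∈ ns then f k else d.getD k [] := by
  induction ns generalizing d with
  | nil => simp
  | cons n ns ih =>
    rw [List.foldl_cons, ih]
    by_cases hin : k ∈ ns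
    · simp [hin]
    · rw [PySem.Dict.getD_insert]
      by_cases hk : k = n
      · subst hk; simp [hin]
      · simp [hin, hk]

-- ===== VERDICT (by name: the statement is the Claim_ definition above) =====
theorem filter_tournament_standings_spec : Claim_equal_filter_tournament_standings := by
  intro data _hdom _hpre
  unfold Spec_filter_tournament_standings
  unfold filter_tournament_standings filter_tournament_standings_alt
  simp only [pv_mk_top, pv_mk_inner]
  cases hcat : pvLookupTop data "category" with
  | none => simp
  | some cats =>
    by_cases hce : cats = []
    · simp [hce]
    · simp only [Option.getD_some, hce, if_false]
      have hnames : (cats.filterMap (fun cat =>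
          match pvLookup cat "Category" with
          | some s => if s = "" then none else some s
          | none => none)) = pvCategoryNames cats := rfl
      have hkeyf : (fun x => match pvLookup x "OrderNo" with
          | none => (0 : Int)
          | some s => (PySem.Int.ofStr? s).getD 0) = pvKey := rfl
      rw [hnames, hkeyf]
      set names := pvCategoryNames cats with hn
      set D0 : PySem.Dict String (List (List (String × String))) :=
        names.foldl (fun d name => d.insert name []) PySem.Dict.empty with hD0
      set points := (pvLookupTop data "points").getD [] with hpoints
      set valid := points.filter (fun t =>
        match pvLookup t "Category" with
        | some c => (PySem.Set.ofList names).contains c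
        | none => false) with hvalid
      set ordered := PySem.List.sorted valid pvKey false with hord
      set fB : String → List (List (String × String)) :=
        fun name => ordered.filter (fun t => pvLookup t "Category" == some name) with hfB
      set dictB : PySem.Dict String (List (List (String × String))) :=
        names.foldl (fun d name => d.insert name (fB name)) PySem.Dict.empty with hdictB
      -- keys of both dicts are the distinct names, in first-insertion order
      have hkD0 : D0.keys = PySem.Set.ofList names := by
        rw [hD0, PySem.Dict.keys_foldl_insert]
        simp [PySem.Set.update_nil_left]
      have hkB : dictB.keys = PySem.Set.ofList names := by
        rw [hdictB, PySem.Dict.keys_foldl_insert]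
        simp [PySem.Set.update_nil_left]
      have hndnames : (PySem.Set.ofList names).Nodup := PySem.Set.nodup_ofList names
      -- A side
      have hkeysA : (points.foldl pvStepA D0).keys = D0.keys := pv_keysA points D0
      have hAitems : (points.foldl pvStepA D0).items =
          (PySem.Set.ofList names).map (fun k => (k, (points.foldl pvStepA D0).getD k [])) := by
        rw [← hkD0, ← hkeysA]
        exact PySem.Dict.items_eq_map_keys _ (by rw [hkeysA, hkD0]; exact hndnames) []
      -- B side
      have hBitems : dictB.items =
          (PySem.Set.ofList names).map (fun k => (k, dictB.getD k [])) := by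
        rw [← hkB]
        exact PySem.Dict.items_eq_map_keys _ (by rw [hkB]; exact hndnames) []
      rw [hAitems, hBitems, List.map_map]
      apply List.map_congr_left
      intro k hk
      have hkn : k ∈ names := (PySem.Set.mem_ofList names k).mp hk
      have hcont : D0.contains k = true := by
        rw [PySem.Dict.contains_iff_mem_keys, hkD0]; exact hk
      have hgd0 : D0.getD k [] = [] := by
        rw [hD0, pv_getD_comp (fun _ => [])]
        simp [hkn]
      have hA : (points.foldl pvStepA D0).getD k [] =
          points.filter (fun t => pvLookup t "Category" == some k) := by
        rw [pv_getDA points D0 k hcont, hgd0, List.nil_append]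
      have hB : dictB.getD k [] = fB k := by
        rw [hdictB, pv_getD_comp fB]
        simp [hkn]
      have hvf : valid.filter (fun t => pvLookup t "Category" == some k) =
          points.filter (fun t => pvLookup t "Category" == some k) := by
        rw [hvalid, List.filter_filter]
        apply List.filter_congr
        intro t _ht
        cases hct : pvLookup t "Category" with
        | none => simp
        | some c =>
          by_cases hkc : c = k
          · subst hkc
            simp only [PySem.Set.contains]
            simp [hkn]
          · simp [hkc]
      simp only [Function.comp_apply]
      rw [hA, hB, hfB]
      simp only
      rw [hord, pv_filter_sorted pvKey _ valid, hvf]
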